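-- pv_equiv track=rewrite | github.com/pypi-data/pypi-code-69 | scapy-helper/scapy_helper-0.1.9-py3-none-any.whl/main.py | _create_diff_indexes_list
-- ===== SOURCE A (Python) =====
-- def _create_diff_indexes_list(indexes):
--     new_list = []
--     for x in range(max(indexes) + 1):
--         new_list.append("  ")
--     for idx in indexes:
--         if idx < 10:
--             new_list[idx] = str("^%s" % idx)
--         else:
--             new_list[idx] = str(idx)
--     new_list.append("| position")
--     return ' '.join(new_list)
-- ===== SOURCE B (Python) =====
-- def _create_diff_indexes_list(indexes):
--     parts = []
--     prev = -1
--     for p in sorted(set(indexes)):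
--         parts.extend(["  "] * (p - prev - 1))
--         parts.append("^%s" % p if p < 10 else str(p))
--         prev = p
--     parts.append("| position")
--     return " ".join(parts)
-- ===== Notes on version B (the rewrite author's own statement) =====
-- stated objective: alternative
-- what changed: Instead of allocating a max+1 list of blanks and overwriting cells by index assignment, B sorts the distinct positions and emits the row left-to-right in one pass, filling each gap between consecutive markers with blank cells; Pre_ excludes the empty list (A raises) and lists with a negative index, where A's negative-index wraparound placement and B's sorted listing are both accidental.
-- outside the precondition, e.g. on _create_diff_indexes_list([1, -1]): A returns '   ^-1 | position', B returns '^-1    ^1 | position'; on _create_diff_indexes_list([]): A raises ValueError, B returns '| position'; on _create_diff_indexes_list([-3, -1]): A raises IndexError, B returns '^-3    ^-1 | position'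
import Mathlib
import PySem

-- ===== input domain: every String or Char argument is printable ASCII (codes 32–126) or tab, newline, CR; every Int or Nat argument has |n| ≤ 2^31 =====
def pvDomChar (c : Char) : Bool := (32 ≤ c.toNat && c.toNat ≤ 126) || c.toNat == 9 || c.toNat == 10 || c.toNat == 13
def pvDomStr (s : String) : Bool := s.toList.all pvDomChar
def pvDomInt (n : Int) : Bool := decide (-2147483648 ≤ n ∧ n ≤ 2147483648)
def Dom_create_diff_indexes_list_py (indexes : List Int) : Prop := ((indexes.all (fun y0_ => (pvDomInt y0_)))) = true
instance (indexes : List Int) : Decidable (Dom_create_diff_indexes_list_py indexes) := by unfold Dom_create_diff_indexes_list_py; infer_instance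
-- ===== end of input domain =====

-- B renders the row in one sorted left-to-right pass (gap cells run-length-filled between markers)
-- instead of A's allocate-then-overwrite scheme; equal on Pre_ (nonempty, nonnegative indices).

-- ===== PORT A =====
def create_diff_indexes_list_py (indexes : List Int) : String :=
  -- max(indexes): ValueError on [] — excluded by Pre_; .getD 0 is never used inside Pre_
  let m := (PySem.List.max? indexes (fun y => y)).getD 0
  -- for x in range(max(indexes) + 1): new_list.append("  ")
  let l0 : List String := (PySem.List.pyRange 0 (m + 1) 1).foldl (fun acc _ => acc ++ ["  "]) []
  -- for idx in indexes: new_list[idx] = … (pySetD: total form of Python's list-index assignment, exact under Pre_)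
  let l1 := indexes.foldl (fun acc idx =>
      if idx < 10 then PySem.List.pySetD acc idx ("^" ++ PySem.Int.toStr idx)
      else PySem.List.pySetD acc idx (PySem.Int.toStr idx)) l0
  PySem.Str.join " " (l1 ++ ["| position"])

-- ===== PORT B =====
def create_diff_indexes_list_py_alt (indexes : List Int) : String :=
  -- for p in sorted(set(indexes)): parts.extend(["  "] * (p - prev - 1)); parts.append(marker)
  let st := (PySem.List.sorted (PySem.Set.ofList indexes) (fun y => y) false).foldl
    (fun (st : List String × Int) p =>
      (st.1 ++ PySem.List.pyRepeat ["  "] (p - st.2 - 1)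
            ++ [if p < 10 then "^" ++ PySem.Int.toStr p else PySem.Int.toStr p], p))
    ([], -1)
  PySem.Str.join " " (st.1 ++ ["| position"])

-- ===== PRECONDITION & SPEC =====
-- Pre_ excludes [] (A raises ValueError from max) and lists containing a negative index: a negative
-- diff position is meaningless, and there A's placement (Python negative-index wraparound) and B's
-- (the marker listed in sorted order before position 0) are both accidental — neither value is one
-- anybody would specify.
def Pre_create_diff_indexes_list_py (indexes : List Int) : Prop :=
  indexes ≠ [] ∧ ∀ i ∈ indexes, 0 ≤ i
instance (indexes : List Int) : Decidable (Pre_create_diff_indexes_list_py indexes) := by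
  unfold Pre_create_diff_indexes_list_py; infer_instance

def pvWitness_create_diff_indexes_list_py : List Int := [12, 3, 3, 0]

def Spec_create_diff_indexes_list_py (indexes : List Int) (out : String) : Prop :=
  out = create_diff_indexes_list_py_alt indexes
instance (indexes : List Int) (out : String) : Decidable (Spec_create_diff_indexes_list_py indexes out) := by
  unfold Spec_create_diff_indexes_list_py; infer_instance

-- ===== CLAIM (what is proved, stated in full; the proofs are below) =====
def Claim_equal_create_diff_indexes_list_py : Prop := ∀ (indexes : List Int), Dom_create_diff_indexes_list_py indexes → Pre_create_diff_indexes_list_py indexes → Spec_create_diff_indexes_list_py indexes (create_diff_indexes_list_py indexes)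

-- ===== LEMMAS AND PROOFS =====

-- the marker string both programs write for an index
def pvMarker (i : Int) : String :=
  if i < 10 then "^" ++ PySem.Int.toStr i else PySem.Int.toStr i

-- the cells B emits while scanning the strictly increasing positions S, last emitted position = prev
def pvCells (prev : Int) : List Int → List String
  | [] => []
  | p :: S => List.replicate (p - prev - 1).toNat "  " ++ [pvMarker p] ++ pvCells p S

-- B's pair-state fold produces exactly pvCells
theorem pv_foldB (S : List Int) : ∀ (acc : List String) (prev : Int),
    (S.foldl (fun (st : List String × Int) p =>
        (st.1 ++ PySem.List.pyRepeat ["  "] (p - st.2 - 1) ++ [pvMarker p], p)) (acc, prev)).1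
      = acc ++ pvCells prev S := by
  induction S with
  | nil => intro acc prev; simp [pvCells]
  | cons p S ih =>
    intro acc prev
    simp only [List.foldl_cons, pvCells]
    rw [ih]
    simp [PySem.List.pyRepeat_singleton, List.append_assoc]

-- A's overwrite loop, pointwise (all indices nonnegative and in range)
theorem pv_foldA (l : List Int) : ∀ (acc : List String) (p : Nat),
    (∀ i ∈ l, 0 ≤ i ∧ i < acc.length) →
    (l.foldl (fun acc idx => PySem.List.pySetD acc idx (pvMarker idx)) acc)[p]?
      = if (p : Int) ∈ l then some (pvMarker p) else acc[p]? := by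
  induction l with
  | nil => intro acc p _; simp
  | cons i l ih =>
    intro acc p hr
    have hi := hr i (by simp)
    have hset : PySem.List.pySetD acc i (pvMarker i) = acc.set i.toNat (pvMarker i) :=
      PySem.List.pySetD_of_nonneg acc (pvMarker i) hi.1
    simp only [List.foldl_cons, hset]
    rw [ih _ p (fun j hj => by simpa using hr j (List.mem_cons_of_mem i hj))]
    by_cases hpl : (p : Int) ∈ l
    · simp [hpl, List.mem_cons]
    · rw [if_neg hpl, List.getElem?_set]
      by_cases hpi : (p : Int) = i
      · have h1 : i.toNat = p := by omega
        have h2 : i.toNat < acc.length := by omega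
        rw [if_pos h1, if_pos h2, if_pos (List.mem_cons.mpr (Or.inl hpi)), ← hpi]
      · rw [if_neg (by omega), if_neg (by simp [List.mem_cons, hpi, hpl])]

-- the last element of a strictly increasing list containing its bound m is m
theorem pv_getLastD_max (S : List Int) : ∀ (d m : Int), S.Pairwise (· < ·) → m ∈ S →
    (∀ x ∈ S, x ≤ m) → S.getLastD d = m := by
  induction S with
  | nil => intro d m _ h; simp at h
  | cons p S ih =>
    intro d m hpw hm hub
    rw [List.getLastD_cons]
    rcases List.mem_cons.mp hm with h | h
    · cases S with
      | nil => simpa using h.symm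
      | cons q S =>
        exfalso
        have hq : p < q := (List.pairwise_cons.mp hpw).1 q (by simp)
        have := hub q (by simp)
        omega
    · exact ih p m (List.pairwise_cons.mp hpw).2 h (fun x hx => hub x (by simp [hx]))

-- length of the emitted cells
theorem pv_cells_length (S : List Int) : ∀ (prev : Int), S.Pairwise (· < ·) →
    (∀ p ∈ S, prev < p) →
    (pvCells prev S).length = (S.getLastD prev - prev).toNat := by
  induction S with
  | nil => intro prev _ _; simp [pvCells]
  | cons p S ih =>
    intro prev hpw hgt
    have hp : prev < p := hgt p (by simp)
    have hlast : S.getLastD p = p ∨ S.getLastD p ∈ S := by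
      cases S with
      | nil => left; rfl
      | cons q S => right; rw [List.getLastD_cons]; exact List.getLastD_mem_cons
    have hge : p ≤ S.getLastD p := by
      rcases hlast with h | h
      · omega
      · exact le_of_lt ((List.pairwise_cons.mp hpw).1 _ h)
    simp only [pvCells, List.length_append, List.length_replicate, List.length_cons,
      List.length_nil, List.getLastD_cons]
    rw [ih p (List.pairwise_cons.mp hpw).2 (fun q hq => (List.pairwise_cons.mp hpw).1 q hq)]
    omega

-- the emitted cells, pointwise
theorem pv_cells_get (S : List Int) : ∀ (prev : Int) (k : Nat), S.Pairwise (· < ·) →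
    (∀ p ∈ S, prev < p) → k < (pvCells prev S).length →
    (pvCells prev S)[k]? = some (if (prev + 1 + k) ∈ S then pvMarker (prev + 1 + k) else "  ") := by
  induction S with
  | nil => intro prev k _ _ hk; simp [pvCells] at hk
  | cons p S ih =>
    intro prev k hpw hgt hk
    have hp : prev < p := hgt p (by simp)
    have htail : ∀ q ∈ S, p < q := (List.pairwise_cons.mp hpw).1
    set g : Nat := (p - prev - 1).toNat with hg
    have hcells : pvCells prev (p :: S)
        = (List.replicate g ("  " : String) ++ [pvMarker p]) ++ pvCells p S := by
      simp only [pvCells, List.append_assoc]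
      rw [← hg]
    have hlen1 : (List.replicate g ("  " : String) ++ [pvMarker p]).length = g + 1 := by simp
    rw [hcells] at hk ⊢
    by_cases hlt : k < g + 1
    · rw [List.getElem?_append_left (by rw [hlen1]; exact hlt)]
      by_cases h1 : k < g
      · have hx : prev + 1 + (k : Int) < p := by omega
        have hmem : (prev + 1 + (k : Int)) ∉ p :: S := by
          intro hc
          rcases List.mem_cons.mp hc with h | h
          · omega
          · have := htail _ h; omega
        rw [if_neg hmem, List.getElem?_append_left (by simpa using h1)]
        simp [h1]
      · have hkg : k = g := by omega
        have hx : prev + 1 + (k : Int) = p := by omega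
        rw [hx, if_pos (by simp), List.getElem?_append_right (by simpa using by omega)]
        simp [hkg]
    · rw [List.getElem?_append_right (by rw [hlen1]; omega), hlen1]
      have hklt : k - (g + 1) < (pvCells p S).length := by
        simp only [List.length_append, hlen1] at hk
        omega
      rw [ih p (k - (g + 1)) (List.pairwise_cons.mp hpw).2 htail hklt]
      have hpos : p + 1 + ((k - (g + 1) : Nat) : Int) = prev + 1 + k := by
        have : g + 1 ≤ k := by omega
        push_cast [Nat.cast_sub this]
        omega
      rw [hpos]
      have hxgt : p < prev + 1 + (k : Int) := by omega
      by_cases hmem : (prev + 1 + (k : Int)) ∈ S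
      · rw [if_pos hmem, if_pos (List.mem_cons.mpr (Or.inr hmem))]
      · rw [if_neg hmem, if_neg (by simp [List.mem_cons]; exact ⟨by omega, hmem⟩)]

-- A's overwrite loop keeps the list length
theorem pv_lenA (l : List Int) (acc : List String) :
    (l.foldl (fun acc idx => PySem.List.pySetD acc idx (pvMarker idx)) acc).length = acc.length := by
  induction l generalizing acc with
  | nil => rfl
  | cons i l ih => simp [List.foldl_cons, ih, PySem.List.length_pySetD]

-- ===== VERDICT (by name: the statement is the Claim_ definition above) =====
theorem create_diff_indexes_list_py_spec : Claim_equal_create_diff_indexes_list_py := by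
  intro indexes _ hpre
  obtain ⟨hne, hnonneg⟩ := hpre
  unfold Spec_create_diff_indexes_list_py create_diff_indexes_list_py create_diff_indexes_list_py_alt
  -- max? computes some maximum mx
  obtain ⟨mx, hmx⟩ : ∃ mx, PySem.List.max? indexes (fun y => y) = some mx := by
    cases hh : PySem.List.max? indexes (fun y => y) with
    | none => exact absurd ((PySem.List.max?_eq_none_iff indexes (fun y => y)).mp hh) hne
    | some mx => exact ⟨mx, rfl⟩
  have hmxmem := PySem.List.max?_mem hmx
  have hub : ∀ i ∈ indexes, i ≤ mx := fun i hi => PySem.List.max?_isMax hmx i hi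
  have hm0 : 0 ≤ mx := hnonneg mx hmxmem
  rw [hmx]
  simp only [Option.getD_some]
  set N : Nat := (mx + 1).toNat with hNdef
  have hNc : ((N : Nat) : Int) = mx + 1 := by omega
  -- the fill loop is a constant map over the range
  rw [PySem.List.foldl_append_singleton_eq_map (f := fun _ => ("  " : String))]
  rw [List.nil_append]
  -- normalize both step functions to pvMarker
  have hfA : (fun (acc : List String) idx =>
      if idx < 10 then PySem.List.pySetD acc idx ("^" ++ PySem.Int.toStr idx)
      else PySem.List.pySetD acc idx (PySem.Int.toStr idx))
      = (fun acc idx => PySem.List.pySetD acc idx (pvMarker idx)) := by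
    funext acc idx; by_cases h : idx < 10 <;> simp [pvMarker, h]
  have hfB : (fun (st : List String × Int) p =>
      (st.1 ++ PySem.List.pyRepeat ["  "] (p - st.2 - 1)
            ++ [if p < 10 then "^" ++ PySem.Int.toStr p else PySem.Int.toStr p], p))
      = (fun (st : List String × Int) p =>
      (st.1 ++ PySem.List.pyRepeat ["  "] (p - st.2 - 1) ++ [pvMarker p], p)) := by
    funext st p; by_cases h : p < 10 <;> simp [pvMarker, h]
  rw [hfA, hfB]
  congr 1
  congr 1
  -- names for the two cell lists
  set S : List Int := PySem.List.sorted (PySem.Set.ofList indexes) (fun y => y) false with hS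
  have hSpw : S.Pairwise (· < ·) := PySem.List.sorted_ofList_pairwise_lt indexes
  have hSmem : ∀ x : Int, x ∈ S ↔ x ∈ indexes := by
    intro x
    rw [hS, PySem.List.mem_sorted, PySem.Set.mem_ofList]
  have hSgt : ∀ p ∈ S, (-1 : Int) < p := by
    intro p hp; have := hnonneg p ((hSmem p).mp hp); omega
  have hSlast : S.getLastD (-1) = mx := by
    exact pv_getLastD_max S (-1) mx hSpw ((hSmem mx).mpr hmxmem)
      (fun x hx => hub x ((hSmem x).mp hx))
  have hBlen : (pvCells (-1) S).length = N := by
    rw [pv_cells_length S (-1) hSpw hSgt, hSlast]; omega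
  rw [pv_foldB]
  rw [List.nil_append]
  have hfillLen : ((PySem.List.pyRange 0 (mx + 1) 1).map (fun _ => ("  " : String))).length = N := by
    simp [PySem.List.length_pyRange_one]; omega
  have hALen : (indexes.foldl (fun acc idx => PySem.List.pySetD acc idx (pvMarker idx))
      ((PySem.List.pyRange 0 (mx + 1) 1).map (fun _ => ("  " : String)))).length = N := by
    rw [pv_lenA]; exact hfillLen
  apply List.ext_getElem?
  intro p
  by_cases hp : p < N
  · rw [pv_foldA indexes _ p (fun i hi => ⟨hnonneg i hi, by rw [hfillLen]; have := hub i hi; have := hnonneg i hi; omega⟩)]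
    rw [pv_cells_get S (-1) p hSpw hSgt (by omega)]
    have hx : (-1 : Int) + 1 + (p : Nat) = (p : Int) := by omega
    rw [hx]
    by_cases hmemp : (p : Int) ∈ indexes
    · rw [if_pos hmemp, if_pos ((hSmem _).mpr hmemp)]
    · rw [if_neg hmemp, if_neg (fun hc => hmemp ((hSmem _).mp hc))]
      rw [show (mx + 1 : Int) = ((N : Nat) : Int) from hNc.symm,
        PySem.List.getElem?_map_pyRange_zero (fun _ => ("  " : String)) N p hp]
  · rw [List.getElem?_eq_none (by rw [hALen]; omega),
        List.getElem?_eq_none (by rw [hBlen]; omega)]
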